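-- pv_equiv track=rewrite | github.com/takahashikazuho/LeafletApp | pathSearch.py | reorder_tsp_st_to_en
-- ===== SOURCE A (Python) =====
-- def reorder_tsp_st_to_en(lst, st, en):
--     n = len(lst)
--     idx_st = lst.index(st)
--     idx_en = lst.index(en)
--     # stとenが隣接していない場合はエラー
--     if abs(idx_st - idx_en) != 1:
--         raise ValueError('stとenは隣接していません')
--     # 巡回的にリストを回転
--     if (idx_st + 1) % n == idx_en:
--         # st, en の順
--         # st ... en ... (巡回的) ... st
--         # 出力: st, 残り逆順, en
--         between = []
--         # en+1から末尾→先頭からst-1まで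
--         i = (idx_en+1) % n
--         while i != idx_st:
--             between.append(lst[i])
--             i = (i+1) % n
--         return [st] + between[::-1] + [en]
--     elif (idx_en + 1) % n == idx_st:
--         # en, st の順
--         between = []
--         i = (idx_st+1) % n
--         while i != idx_en:
--             between.append(lst[i])
--             i = (i+1) % n
--         return [st] + between + [en]
--     else:
--         raise ValueError('隣接判定ロジックエラー')
-- ===== SOURCE B (Python) =====
-- def reorder_tsp_st_to_en(lst, st, en):
--     idx_st = lst.index(st)
--     idx_en = lst.index(en)
--     if abs(idx_st - idx_en) != 1:
--         raise ValueError('stとenは隣接していません')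
--     # rotate so the list starts at st, then one branch decides direction
--     rot = lst[idx_st:] + lst[:idx_st]
--     if idx_en == idx_st + 1:
--         return [st] + rot[1:][::-1]
--     return rot
-- ===== Notes on version B (the rewrite author's own statement) =====
-- stated objective: simpler
-- what changed: replaces A's two symmetric modular while-loops building 'between' with a single whole-list rotation (two slices) and one direction branch
import Mathlib
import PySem

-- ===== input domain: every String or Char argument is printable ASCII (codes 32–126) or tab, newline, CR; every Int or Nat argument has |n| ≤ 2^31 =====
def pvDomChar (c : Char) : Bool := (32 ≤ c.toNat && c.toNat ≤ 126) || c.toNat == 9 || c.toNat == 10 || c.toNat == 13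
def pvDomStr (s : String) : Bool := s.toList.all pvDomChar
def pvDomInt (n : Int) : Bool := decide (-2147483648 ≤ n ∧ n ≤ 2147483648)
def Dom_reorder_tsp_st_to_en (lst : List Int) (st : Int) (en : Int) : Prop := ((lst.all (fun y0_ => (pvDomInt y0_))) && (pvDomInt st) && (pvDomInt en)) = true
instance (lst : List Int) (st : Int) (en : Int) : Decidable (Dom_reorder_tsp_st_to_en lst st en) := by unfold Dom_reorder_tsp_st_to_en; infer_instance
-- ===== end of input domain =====

-- B replaces A's two symmetric modular while-loops with one whole-list rotation (two slices)
-- and a single direction branch (objective: simpler). Equality of RETURN values on Pre_.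

-- ===== PORT A =====
-- the while loop 'while i != stop: between.append(lst[i]); i = (i+1) % n'; fuel = n suffices
-- since the loop takes at most n-1 steps whenever it is reached (i, stop < n).
def pvCollect (lst : List Int) (n stop : Nat) : Nat → Nat → List Int
  | _, 0 => []
  | i, fuel+1 => if i = stop then [] else lst.getD i 0 :: pvCollect lst n stop ((i+1) % n) fuel

def reorder_tsp_st_to_en (lst : List Int) (st : Int) (en : Int) : List Int :=
  let n := lst.length
  match PySem.List.index? lst st, PySem.List.index? lst en with
  | some idx_st, some idx_en =>
    if ((idx_st : Int) - idx_en).natAbs ≠ 1 then []   -- raise ValueError (outside Pre_)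
    else if (idx_st + 1) % n = idx_en then
      let between := pvCollect lst n idx_st ((idx_en + 1) % n) n
      [st] ++ between.reverse ++ [en]
    else if (idx_en + 1) % n = idx_st then
      let between := pvCollect lst n idx_en ((idx_st + 1) % n) n
      [st] ++ between ++ [en]
    else []                                           -- raise ValueError (outside Pre_)
  | _, _ => []                                        -- lst.index raises (outside Pre_)

-- ===== PORT B =====
def reorder_tsp_st_to_en_alt (lst : List Int) (st : Int) (en : Int) : List Int :=
  match PySem.List.index? lst st with
  | none => []                                        -- lst.index(st) raises (outside Pre_)
  | some idx_st =>
    match PySem.List.index? lst en with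
    | none => []                                      -- lst.index(en) raises (outside Pre_)
    | some idx_en =>
      if ((idx_st : Int) - idx_en).natAbs ≠ 1 then [] -- raise ValueError (outside Pre_)
      else
        let rot := lst.drop idx_st ++ lst.take idx_st -- lst[idx_st:] + lst[:idx_st]
        if idx_en = idx_st + 1 then [st] ++ (rot.drop 1).reverse -- [st] + rot[1:][::-1]
        else rot

-- ===== PRECONDITION & SPEC =====
-- exactly the inputs where Python A returns: st and en occur in lst and their first
-- occurrences are at adjacent indices (|index(st) - index(en)| = 1).
def Pre_reorder_tsp_st_to_en (lst : List Int) (st : Int) (en : Int) : Prop :=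
  PySem.List.index? lst st ≠ none ∧ PySem.List.index? lst en ≠ none ∧
    ((PySem.List.index? lst st).getD 0 + 1 = (PySem.List.index? lst en).getD 0 ∨
     (PySem.List.index? lst en).getD 0 + 1 = (PySem.List.index? lst st).getD 0)
instance (lst : List Int) (st : Int) (en : Int) : Decidable (Pre_reorder_tsp_st_to_en lst st en) := by
  unfold Pre_reorder_tsp_st_to_en; infer_instance

def pvWitness_reorder_tsp_st_to_en : List Int × Int × Int := ([3, 1, 4, 2], 1, 4)

def Spec_reorder_tsp_st_to_en (lst : List Int) (st : Int) (en : Int) (out : List Int) : Prop := out = reorder_tsp_st_to_en_alt lst st en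
instance (lst : List Int) (st : Int) (en : Int) (out : List Int) : Decidable (Spec_reorder_tsp_st_to_en lst st en out) := by unfold Spec_reorder_tsp_st_to_en; infer_instance

-- ===== CLAIM (what is proved, stated in full; the proofs are below) =====
def Claim_equal_reorder_tsp_st_to_en : Prop := ∀ (lst : List Int) (st : Int) (en : Int), Dom_reorder_tsp_st_to_en lst st en → Pre_reorder_tsp_st_to_en lst st en → Spec_reorder_tsp_st_to_en lst st en (reorder_tsp_st_to_en lst st en)

-- ===== LEMMAS AND PROOFS =====

-- upward phase: from i ≤ stop (< n) the loop walks straight up and collects lst[i:stop]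
theorem pvCollect_up (lst : List Int) (stop : Nat) (hs : stop < lst.length) :
    ∀ fuel i, i ≤ stop → stop - i ≤ fuel →
      pvCollect lst lst.length stop i fuel = (lst.take stop).drop i := by
  intro fuel
  induction fuel with
  | zero =>
    intro i h1 h2
    have : i = stop := by omega
    subst this
    simp [pvCollect, List.drop_eq_nil_of_le, List.length_take]
  | succ f ih =>
    intro i h1 h2
    by_cases h : i = stop
    · subst h
      simp [pvCollect, List.drop_eq_nil_of_le, List.length_take]
    · have hi : i < stop := by omega
      have hin : i < lst.length := by omega
      have hmod : (i + 1) % lst.length = i + 1 := Nat.mod_eq_of_lt (by omega)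
      rw [pvCollect, if_neg h, hmod, ih (i+1) (by omega) (by omega)]
      have hitake : i < (lst.take stop).length := by simp [List.length_take]; omega
      rw [List.drop_eq_getElem_cons hitake]
      simp [List.getElem_take, List.getD_eq_getElem?_getD, List.getElem?_eq_getElem hin]

-- wrap phase: from stop < i < n the loop walks to the end, wraps to 0, then up to stop
theorem pvCollect_wrap (lst : List Int) (stop : Nat) (hs : stop < lst.length) :
    ∀ fuel i, stop < i → i < lst.length → lst.length - i + stop ≤ fuel →
      pvCollect lst lst.length stop i fuel = lst.drop i ++ lst.take stop := by
  intro fuel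
  induction fuel with
  | zero => intro i h1 h2 h3; omega
  | succ f ih =>
    intro i h1 h2 h3
    have hne : i ≠ stop := by omega
    rw [pvCollect, if_neg hne]
    have hdrop : lst.drop i = lst[i] :: lst.drop (i+1) := List.drop_eq_getElem_cons h2
    have hget : lst.getD i 0 = lst[i] := by
      simp [List.getD_eq_getElem?_getD, List.getElem?_eq_getElem h2]
    by_cases hend : i + 1 = lst.length
    · have hmod : (i + 1) % lst.length = 0 := by rw [hend]; exact Nat.mod_self _
      rw [hmod, pvCollect_up lst stop hs f 0 (by omega) (by omega)]
      have hnil : lst.drop (i+1) = [] := List.drop_eq_nil_of_le (by omega)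
      rw [hget, hdrop, hnil, List.cons_append, List.nil_append, List.drop_zero]
    · have hmod : (i + 1) % lst.length = i + 1 := Nat.mod_eq_of_lt (by omega)
      rw [hmod, ih (i+1) (by omega) (by omega) (by omega), hget, hdrop, List.cons_append]

theorem take_succ_getElem (lst : List Int) (k : Nat) (hk : k < lst.length) :
    lst.take (k+1) = lst.take k ++ [lst[k]] := by
  rw [List.take_add_one, List.getElem?_eq_getElem hk]
  rfl

-- ===== VERDICT (by name: the statement is the Claim_ definition above) =====
theorem reorder_tsp_st_to_en_spec : Claim_equal_reorder_tsp_st_to_en := by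
  intro lst st en _ hpre
  obtain ⟨h1, h2, h3⟩ := hpre
  unfold Spec_reorder_tsp_st_to_en reorder_tsp_st_to_en reorder_tsp_st_to_en_alt
  cases hst : PySem.List.index? lst st with
  | none => exact absurd hst h1
  | some i =>
  cases hen : PySem.List.index? lst en with
  | none => exact absurd hen h2
  | some j =>
  rw [hst, hen] at h3
  simp only [Option.getD_some] at h3
  obtain ⟨hi, hgi, -⟩ := PySem.List.getElem_of_index?_eq_some hst
  obtain ⟨hj, hgj, -⟩ := PySem.List.getElem_of_index?_eq_some hen
  have habs : ¬ ((i : Int) - j).natAbs ≠ 1 := by omega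
  simp only [hst, hen]
  rw [if_neg habs, if_neg habs]
  rcases h3 with hcase | hcase
  · -- st then en : j = i + 1
    subst hcase
    rw [if_pos (Nat.mod_eq_of_lt hj), if_pos rfl]
    have hB : (lst.drop i ++ lst.take i).drop 1 = lst.drop (i+1) ++ lst.take i := by
      rw [List.drop_eq_getElem_cons hi]; rfl
    rw [hB]
    by_cases hn : i + 2 = lst.length
    · -- en is the last element; the loop wraps to 0 immediately
      have h0 : (i + 1 + 1) % lst.length = 0 := by rw [show i+1+1 = lst.length by omega]; exact Nat.mod_self _
      rw [h0, pvCollect_up lst i (by omega) lst.length 0 (by omega) (by omega)]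
      have hd1 : lst.drop (i+1) = [lst[i+1]] := by
        rw [List.drop_eq_getElem_cons hj, List.drop_eq_nil_of_le (by omega)]
      rw [List.drop_zero, hd1, hgj]
      simp
    · have hlt : i + 2 < lst.length := by omega
      have h0 : (i + 1 + 1) % lst.length = i + 2 := Nat.mod_eq_of_lt hlt
      rw [h0, pvCollect_wrap lst i (by omega) lst.length (i+2) (by omega) (by omega) (by omega)]
      have hd1 : lst.drop (i+1) = lst[i+1] :: lst.drop (i+2) := List.drop_eq_getElem_cons hj
      rw [hd1, hgj]
      simp
  · -- en then st : i = j + 1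
    rw [if_neg (by omega : ¬ j = i + 1)]
    by_cases hA1 : (i + 1) % lst.length = j
    · -- only possible when the list has exactly two elements
      have hge : 2 ≤ lst.length := by omega
      have hdm := Nat.div_add_mod (i+1) lst.length
      have hmlt : (i+1) % lst.length < lst.length := Nat.mod_lt _ (by omega)
      have hmul : lst.length * ((i+1) / lst.length) = 2 := by omega
      have hdvd : lst.length ∣ 2 := ⟨_, hmul.symm⟩
      have hle2 : lst.length ≤ 2 := Nat.le_of_dvd (by omega) hdvd
      have hn2 : lst.length = 2 := by omega
      have hi1 : i = 1 := by omega
      have hj0 : j = 0 := by omega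
      subst hi1; subst hj0
      rw [if_pos hA1]
      have hstart : (0 + 1) % lst.length = 1 := by rw [hn2]
      rw [hstart, pvCollect_up lst 1 (by omega) lst.length 1 le_rfl (by omega)]
      have htk : (lst.take 1).drop 1 = [] := List.drop_eq_nil_of_le (by simp)
      have hd1 : lst.drop 1 = [lst[1]] := by
        rw [List.drop_eq_getElem_cons hi, List.drop_eq_nil_of_le (by omega)]
      have ht1 : lst.take 1 = [lst[0]] := by
        rw [take_succ_getElem lst 0 (by omega)]; rfl
      rw [htk, hd1, ht1, hgi, hgj]
      simp
    · rw [if_neg hA1, if_pos (by rw [hcase]; exact Nat.mod_eq_of_lt hi)]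
      have hdropi : lst.drop i = lst[i] :: lst.drop (i+1) := List.drop_eq_getElem_cons hi
      have htakei : lst.take i = lst.take j ++ [lst[j]] := by
        rw [← hcase]; exact take_succ_getElem lst j hj
      by_cases hend : i + 1 = lst.length
      · have h0 : (i + 1) % lst.length = 0 := by rw [hend]; exact Nat.mod_self _
        rw [h0, pvCollect_up lst j (by omega) lst.length 0 (by omega) (by omega)]
        have hdnil : lst.drop (i+1) = [] := List.drop_eq_nil_of_le (by omega)
        rw [List.drop_zero, hdropi, hdnil, htakei, hgi, hgj]
        simp
      · have h0 : (i + 1) % lst.length = i + 1 := Nat.mod_eq_of_lt (by omega)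
        rw [h0, pvCollect_wrap lst j (by omega) lst.length (i+1) (by omega) (by omega) (by omega)]
        rw [hdropi, htakei, hgi, hgj]
        simp
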